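-- pv_equiv track=rewrite | github.com/mnurzia/bbre | tools/make_docs.py | _pop_comment
-- ===== SOURCE A (Python) =====
-- def _strip_common_indent(lines: list[str]) -> list[str]:
--     # Strip a uniform amount of whitespace from every line.
--     indent = min(len(line) - len(line.lstrip()) for line in lines)
--     return [line[indent:] for line in lines]
--
-- def _pop_comment(lines: list[str]) -> list[str]:
--     # Assuming `lines` begins with a multiline comment, pop the comment.
--     out_lines: list[str] = []
--     assert lines[0].lstrip().startswith("/*")
--     while not lines[0].endswith("*/"):
--         out_lines.append(lines.pop(0))
--     assert lines[0].endswith("*/")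
--     out_lines.append(lines.pop(0)[:-2])
--     return _strip_common_indent(
--         [l.lstrip().lstrip("/").lstrip("*").rstrip() for l in out_lines]
--     )
-- ===== SOURCE B (Python) =====
-- def _pop_comment(lines: list[str]) -> list[str]:
--     # Single fused pass: clean each comment line and track the minimum indent
--     # while scanning for the "*/" terminator, then slice once at the end.
--     # Mutates `lines` exactly like the original (the comment prefix is removed).
--     assert lines[0].lstrip().startswith("/*")
--     cleaned: list[str] = []
--     indent = None
--     for i, raw in enumerate(lines):
--         done = raw.endswith("*/")
--         if done:
--             raw = raw[:-2]
--         l = raw.lstrip().lstrip("/").lstrip("*").rstrip()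
--         cleaned.append(l)
--         k = len(l) - len(l.lstrip())
--         if indent is None or k < indent:
--             indent = k
--         if done:
--             del lines[: i + 1]
--             return [s[indent:] for s in cleaned]
--     raise IndexError("unterminated comment")
-- ===== Notes on version B (the rewrite author's own statement) =====
-- stated objective: alternative
-- what changed: Replaces the quadratic pop(0) loop plus three subsequent passes (clean comprehension, min() pass, slice comprehension) by a single fused scan that cleans each line and maintains the running minimum indent online, then slices once and deletes the consumed prefix in one step.
import Mathlib
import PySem

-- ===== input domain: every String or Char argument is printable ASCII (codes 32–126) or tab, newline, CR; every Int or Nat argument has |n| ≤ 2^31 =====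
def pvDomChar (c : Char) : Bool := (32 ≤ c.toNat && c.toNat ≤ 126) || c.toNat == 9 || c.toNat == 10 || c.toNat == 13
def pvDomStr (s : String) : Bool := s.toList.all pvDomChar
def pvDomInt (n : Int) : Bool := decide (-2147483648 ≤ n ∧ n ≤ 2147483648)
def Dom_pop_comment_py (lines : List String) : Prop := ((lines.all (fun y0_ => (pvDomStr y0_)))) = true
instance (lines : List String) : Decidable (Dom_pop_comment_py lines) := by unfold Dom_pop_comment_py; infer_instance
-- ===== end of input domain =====

-- B fuses A's pop(0) loop and its three later passes into one scan with an online minimum;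
-- equivalence is about the RETURN value (both Pythons also remove the same prefix from `lines` in place).

-- shared helpers (the identical cleaning expression both Pythons contain)
-- s.lstrip(c) for a single character c, ported by hand as dropWhile (exact for a one-char strip set)
def pvLstripChar (c : Char) (s : String) : String := String.ofList (s.toList.dropWhile (· == c))
-- l.lstrip().lstrip("/").lstrip("*").rstrip()
def pvClean (s : String) : String :=
  PySem.Str.rstrip (pvLstripChar '*' (pvLstripChar '/' (PySem.Str.lstrip s)))
-- len(line) - len(line.lstrip())
def pvInd (s : String) : Int := PySem.Str.len s - PySem.Str.len (PySem.Str.lstrip s)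

-- ===== PORT A =====
-- _strip_common_indent: min() over the indent widths, then slice every line
def stripCommonIndent_py (ls : List String) : List String :=
  match PySem.List.min? (ls.map pvInd) id with
  | none => []   -- min() on an empty sequence raises ValueError; unreachable here (out_lines is never empty)
  | some indent => ls.map (fun l => PySem.Str.slice l (some indent) none)

-- the while-not-endswith pop(0) loop; appends the truncated terminator line at the end
def pop_comment_loop (lines out_lines : List String) : List String :=
  match lines with
  | [] => out_lines   -- lines[0] raises IndexError; excluded by Pre_
  | l :: rest =>
    if PySem.Str.endswith l "*/" then out_lines ++ [PySem.Str.slice l none (some (-2))]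
    else pop_comment_loop rest (out_lines ++ [l])

def pop_comment_py (lines : List String) : List String :=
  match lines with
  | [] => []          -- lines[0] raises IndexError; excluded by Pre_
  | l0 :: _ =>
    if PySem.Str.startswith (PySem.Str.lstrip l0) "/*" then
      stripCommonIndent_py ((pop_comment_loop lines []).map pvClean)
    else []           -- assert fails (AssertionError); excluded by Pre_

-- ===== PORT B =====
-- the `if indent is None or k < indent` update
def pvMinStep (acc : Option Int) (k : Int) : Option Int :=
  match acc with
  | none => some k
  | some j => if k < j then some k else some j

def pop_comment_alt_loop (lines cleaned : List String) (indent : Option Int) : List String :=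
  match lines with
  | [] => []          -- unterminated comment: raise IndexError; excluded by Pre_
  | raw :: rest =>
    let done := PySem.Str.endswith raw "*/"
    let raw' := if done then PySem.Str.slice raw none (some (-2)) else raw
    let l := pvClean raw'
    let cleaned' := cleaned ++ [l]
    let indent' := pvMinStep indent (pvInd l)
    if done then cleaned'.map (fun s => PySem.Str.slice s (some (indent'.getD 0)) none)
    else pop_comment_alt_loop rest cleaned' indent'

def pop_comment_py_alt (lines : List String) : List String :=
  match lines with
  | [] => []          -- assert: lines[0] raises IndexError; excluded by Pre_
  | l0 :: _ =>
    if PySem.Str.startswith (PySem.Str.lstrip l0) "/*" then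
      pop_comment_alt_loop lines [] none
    else []           -- assert fails; excluded by Pre_

-- ===== PRECONDITION & SPEC =====
-- Pre_ excludes exactly the inputs on which A raises: the empty list and a first line not
-- opening a "/*" comment (AssertionError), and a list with no "*/" terminator (IndexError).
def Pre_pop_comment_py (lines : List String) : Prop :=
  lines ≠ [] ∧ PySem.Str.startswith (PySem.Str.lstrip lines.headI) "/*" = true ∧
    lines.any (fun l => PySem.Str.endswith l "*/") = true
instance (lines : List String) : Decidable (Pre_pop_comment_py lines) := by
  unfold Pre_pop_comment_py; infer_instance

def pvWitness_pop_comment_py : List String := ["/* a", " * bb */"]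

def Spec_pop_comment_py (lines : List String) (out : List String) : Prop := out = pop_comment_py_alt lines
instance (lines : List String) (out : List String) : Decidable (Spec_pop_comment_py lines out) := by
  unfold Spec_pop_comment_py; infer_instance

-- ===== CLAIM (what is proved, stated in full; the proofs are below) =====
def Claim_equal_pop_comment_py : Prop := ∀ (lines : List String), Dom_pop_comment_py lines → Pre_pop_comment_py lines → Spec_pop_comment_py lines (pop_comment_py lines)

-- ===== LEMMAS AND PROOFS =====

-- any input containing a terminator splits as (no-terminator prefix) ++ terminator :: rest
theorem pv_exists_decomp (p : String → Bool) :
    ∀ (lines : List String), lines.any p = true →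
      ∃ pre t rest, lines = pre ++ t :: rest ∧ (∀ l ∈ pre, p l = false) ∧ p t = true := by
  intro lines h
  induction lines with
  | nil => simp at h
  | cons x xs ih =>
    by_cases hx : p x = true
    · exact ⟨[], x, xs, by simp, by simp, hx⟩
    · simp [hx] at h
      obtain ⟨pre, t, rest, heq, hpre, ht⟩ := ih (List.any_eq_true.mpr h)
      exact ⟨x :: pre, t, rest, by simp [heq], by
        intro l hl
        rcases List.mem_cons.mp hl with h1 | h2
        · simp [h1]; exact eq_false_of_ne_true hx
        · exact hpre l h2, ht⟩

theorem pv_aloop_eq :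
    ∀ (pre : List String) (t : String) (rest out : List String),
      (∀ l ∈ pre, PySem.Str.endswith l "*/" = false) →
      PySem.Str.endswith t "*/" = true →
      pop_comment_loop (pre ++ t :: rest) out
        = out ++ pre ++ [PySem.Str.slice t none (some (-2))] := by
  intro pre
  induction pre with
  | nil => intro t rest out _ ht; simp only [List.nil_append, pop_comment_loop, ht, if_true]; simp
  | cons x xs ih =>
    intro t rest out hpre ht
    have hx : PySem.Str.endswith x "*/" = false := hpre x (by simp)
    simp only [List.cons_append, pop_comment_loop, hx, Bool.false_eq_true, if_false]
    rw [ih t rest (out ++ [x]) (fun l hl => hpre l (by simp [hl])) ht]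
    simp

theorem pv_bloop_eq :
    ∀ (pre : List String) (t : String) (rest cleaned : List String) (indent : Option Int),
      (∀ l ∈ pre, PySem.Str.endswith l "*/" = false) →
      PySem.Str.endswith t "*/" = true →
      pop_comment_alt_loop (pre ++ t :: rest) cleaned indent
        = (cleaned ++ ((pre ++ [PySem.Str.slice t none (some (-2))]).map pvClean)).map
            (fun s => PySem.Str.slice s
              (some ((List.foldl pvMinStep indent
                (((pre ++ [PySem.Str.slice t none (some (-2))]).map pvClean).map pvInd)).getD 0)) none) := by
  intro pre
  induction pre with
  | nil =>
    intro t rest cleaned indent _ ht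
    simp only [List.nil_append, pop_comment_alt_loop, ht, if_true, List.map_cons,
      List.map_nil, List.foldl_cons, List.foldl_nil]
  | cons x xs ih =>
    intro t rest cleaned indent hpre ht
    have hx : PySem.Str.endswith x "*/" = false := hpre x (by simp)
    simp only [List.cons_append, pop_comment_alt_loop, hx, Bool.false_eq_true, if_false]
    rw [ih t rest (cleaned ++ [pvClean x]) (pvMinStep indent (pvInd (pvClean x)))
      (fun l hl => hpre l (by simp [hl])) ht]
    simp

-- B's online minimum update is exactly min?'s fold step
theorem pv_foldl_ext (f g : Option Int → Int → Option Int) (hfg : ∀ b a, f b a = g b a) :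
    ∀ (l : List Int) (b : Option Int), List.foldl f b l = List.foldl g b l := by
  intro l
  induction l with
  | nil => intro b; rfl
  | cons k ks ih => intro b; simp only [List.foldl_cons, hfg]; exact ih _

theorem pv_min?_eq_fold (ks : List Int) :
    PySem.List.min? ks id = List.foldl pvMinStep none ks := by
  unfold PySem.List.min?
  exact pv_foldl_ext _ pvMinStep (fun b a => by cases b <;> simp [pvMinStep, id]) ks none

theorem pv_fold_isSome (ks : List Int) (j : Int) :
    (List.foldl pvMinStep (some j) ks).isSome = true := by
  induction ks generalizing j with
  | nil => rfl
  | cons k ks ih =>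
    simp only [List.foldl_cons, pvMinStep]
    split_ifs <;> exact ih _

theorem pv_strip_eq (body : List String) (hne : body ≠ []) :
    stripCommonIndent_py body
      = body.map (fun l => PySem.Str.slice l
          (some ((List.foldl pvMinStep none (body.map pvInd)).getD 0)) none) := by
  unfold stripCommonIndent_py
  rw [pv_min?_eq_fold]
  cases body with
  | nil => exact absurd rfl hne
  | cons b bs =>
    simp only [List.map_cons, List.foldl_cons]
    have h := pv_fold_isSome (bs.map pvInd) (pvMinStep none (pvInd b) |>.getD 0)
    cases hfold : List.foldl pvMinStep (pvMinStep none (pvInd b)) (bs.map pvInd) with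
    | none =>
      exfalso
      have : pvMinStep none (pvInd b) = some (pvInd b) := rfl
      rw [this] at hfold
      have := pv_fold_isSome (bs.map pvInd) (pvInd b)
      rw [hfold] at this; simp at this
    | some m => simp

-- ===== VERDICT (by name: the statement is the Claim_ definition above) =====
theorem pop_comment_py_spec : Claim_equal_pop_comment_py := by
  intro lines _ hpre
  obtain ⟨hne, hstart, hany⟩ := hpre
  unfold Spec_pop_comment_py
  obtain ⟨pre, t, rest, heq, hpreF, ht⟩ :=
    pv_exists_decomp (fun l => PySem.Str.endswith l "*/") lines hany
  cases lines with
  | nil => exact absurd rfl hne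
  | cons l0 ls =>
    simp only [List.headI] at hstart
    simp only [pop_comment_py, pop_comment_py_alt, hstart, if_true]
    rw [heq, pv_aloop_eq pre t rest [] hpreF ht, pv_bloop_eq pre t rest [] none hpreF ht]
    rw [pv_strip_eq _ (by simp)]
    simp
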